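-- pv_equiv track=rewrite | github.com/mchrisson/smartBot | server/bot/smartBot.py | slotMissingPrompt
-- ===== SOURCE A (Python) =====
-- def slotMissingPrompt( missingSlots ) :
-- 	response = 'Sorry but you didn\'t specify '
-- 	i = 0
-- 	length = len(missingSlots)
-- 	for slot in missingSlots :
-- 		response += slot
-- 		if ( length != 1 and i == length - 2 ) :
-- 			response += ' and '
-- 		elif ( length == 1 or i == length - 1 ) :
-- 			response += ''
-- 		else :
-- 			response += ', '
-- 		i = i + 1
-- 	response += '. Please rephrase your question.'
-- 	return response
-- ===== SOURCE B (Python) =====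
-- def slotMissingPrompt(missingSlots):
--     if not missingSlots:
--         middle = ''
--     elif len(missingSlots) == 1:
--         middle = missingSlots[0]
--     else:
--         middle = ', '.join(missingSlots[:-1]) + ' and ' + missingSlots[-1]
--     return "Sorry but you didn't specify " + middle + '. Please rephrase your question.'
-- ===== Notes on version B (the rewrite author's own statement) =====
-- stated objective: idiomatic
-- what changed: Replaces A's stateful loop with an index counter and per-element three-way separator branching by a three-case decomposition: empty / single slot / ', '.join of all-but-last plus ' and ' plus the last slot, concatenated between the fixed prefix and suffix.
import Mathlib
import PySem

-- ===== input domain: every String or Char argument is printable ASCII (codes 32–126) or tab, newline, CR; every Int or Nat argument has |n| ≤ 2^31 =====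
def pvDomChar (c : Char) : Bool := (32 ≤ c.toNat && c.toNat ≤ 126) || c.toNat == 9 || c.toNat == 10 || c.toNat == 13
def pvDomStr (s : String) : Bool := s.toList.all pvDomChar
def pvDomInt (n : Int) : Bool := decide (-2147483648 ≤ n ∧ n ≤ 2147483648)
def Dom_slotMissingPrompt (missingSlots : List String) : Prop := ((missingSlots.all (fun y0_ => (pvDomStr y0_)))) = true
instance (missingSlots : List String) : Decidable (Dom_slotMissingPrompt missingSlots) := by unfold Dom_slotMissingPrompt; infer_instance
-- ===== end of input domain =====

-- B replaces A's counter loop with a three-case empty/single/join-plus-last decomposition (idiomatic; same cost).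

-- ===== PORT A =====
-- loop body of A's for-loop, as a named step function over the state (response, i)
def pvStepA (length : Int) (st : String × Int) (slot : String) : String × Int :=
  let response := st.1 ++ slot
  let response :=
    if length ≠ 1 ∧ st.2 = length - 2 then response ++ " and "
    else if length = 1 ∨ st.2 = length - 1 then response ++ ""
    else response ++ ", "
  (response, st.2 + 1)

def slotMissingPrompt (missingSlots : List String) : String :=
  let response := "Sorry but you didn't specify "
  let length : Int := missingSlots.length
  let final := missingSlots.foldl (pvStepA length) (response, 0)
  final.1 ++ ". Please rephrase your question."

-- ===== PORT B =====
def slotMissingPrompt_alt (missingSlots : List String) : String :=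
  let middle :=
    match missingSlots with
    | [] => ""
    | [s] => s
    | _ => PySem.Str.join ", " missingSlots.dropLast ++ " and " ++ missingSlots.getLast!
  "Sorry but you didn't specify " ++ middle ++ ". Please rephrase your question."

-- ===== PRECONDITION & SPEC =====
def Spec_slotMissingPrompt (missingSlots : List String) (out : String) : Prop := out = slotMissingPrompt_alt missingSlots
instance (missingSlots : List String) (out : String) : Decidable (Spec_slotMissingPrompt missingSlots out) := by unfold Spec_slotMissingPrompt; infer_instance

-- ===== CLAIM (what is proved, stated in full; the proofs are below) =====
def Claim_equal_slotMissingPrompt : Prop := ∀ (missingSlots : List String), Dom_slotMissingPrompt missingSlots → Spec_slotMissingPrompt missingSlots (slotMissingPrompt missingSlots)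

-- ===== LEMMAS AND PROOFS =====

-- the separator A appends after the element at index i (n = total length)
def pvSepA (n i : Int) : String :=
  if n ≠ 1 ∧ i = n - 2 then " and "
  else if n = 1 ∨ i = n - 1 then ""
  else ", "

-- what A's loop appends to the prefix, starting at index i
def pvBodyA (n i : Int) : List String → String
  | [] => ""
  | s :: t => s ++ pvSepA n i ++ pvBodyA n (i + 1) t

-- B's middle for lists of length ≥ 2, in list-recursive form
def pvBodyB : List String → String
  | [] => ""
  | [s] => s
  | s :: t => s ++ (if t.length = 1 then " and " else ", ") ++ pvBodyB t

theorem pvStepA_eq (n : Int) (r : String) (i : Int) (s : String) :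
    pvStepA n (r, i) s = (r ++ (s ++ pvSepA n i), i + 1) := by
  unfold pvStepA pvSepA
  split_ifs <;> simp [String.append_assoc, String.append_empty]

theorem pvFoldA (l : List String) (n : Int) (r : String) (i : Int) :
    (l.foldl (pvStepA n) (r, i)).1 = r ++ pvBodyA n i l := by
  induction l generalizing r i with
  | nil => simp [pvBodyA]
  | cons s t ih =>
      rw [List.foldl_cons, pvStepA_eq, ih]
      simp [pvBodyA, String.append_assoc]

theorem pvBodyA_cons (n i : Int) (s : String) (t : List String) :
    pvBodyA n i (s :: t) = s ++ pvSepA n i ++ pvBodyA n (i + 1) t := rfl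

theorem pvBodyB_cons_cons (s a : String) (u : List String) :
    pvBodyB (s :: a :: u) = s ++ (if (a :: u).length = 1 then " and " else ", ") ++ pvBodyB (a :: u) := rfl

theorem pvBody_eq (l : List String) (i n : Int) (h1 : n ≠ 1) (h2 : n = i + l.length) :
    pvBodyA n i l = pvBodyB l := by
  induction l generalizing i with
  | nil => simp [pvBodyA, pvBodyB]
  | cons s t ih =>
      match t with
      | [] =>
          rw [pvBodyA_cons]
          simp only [List.length_cons, List.length_nil] at h2
          have hsep : pvSepA n i = "" := by
            unfold pvSepA
            rw [if_neg (by omega), if_pos (by omega)]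
          rw [hsep]
          simp [pvBodyA, pvBodyB, String.append_empty]
      | a :: u =>
          rw [pvBodyA_cons, ih (i + 1) (by simp at h2 ⊢; omega), pvBodyB_cons_cons]
          simp only [List.length_cons] at h2
          have hsep : pvSepA n i = (if (a :: u).length = 1 then " and " else ", ") := by
            unfold pvSepA
            by_cases hu : u = []
            · subst hu
              simp only [List.length_nil] at h2
              rw [if_pos (by constructor; exact h1; omega), if_pos (by simp)]
            · have hul : 0 < u.length := List.length_pos_iff.mpr hu
              rw [if_neg (by omega), if_neg (by omega), if_neg (by simp; omega)]
          rw [hsep]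

theorem pvStrJoin_singleton (sep p : String) : PySem.Str.join sep [p] = p :=
  String.toList_injective (by
    simp [PySem.Str.toList_join, PySem.Chars.join_singleton])

theorem pvStrJoin_cons_cons (sep p q : String) (rest : List String) :
    PySem.Str.join sep (p :: q :: rest) = p ++ sep ++ PySem.Str.join sep (q :: rest) :=
  String.toList_injective (by
    simp [PySem.Str.toList_join, PySem.Chars.join_cons_cons])

theorem pvBodyB_join (s a : String) (u : List String) :
    pvBodyB (s :: a :: u) =
      PySem.Str.join ", " ((s :: a :: u).dropLast) ++ " and " ++ (s :: a :: u).getLast! := by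
  induction u generalizing s a with
  | nil =>
      simp [pvBodyB, pvStrJoin_singleton, List.getLast!, String.append_assoc]
  | cons b v ih =>
      have lhs : pvBodyB (s :: a :: b :: v) = s ++ ", " ++ pvBodyB (a :: b :: v) := by
        rw [pvBodyB_cons_cons, if_neg (by simp)]
      rw [lhs, ih]
      have hd : (s :: a :: b :: v).dropLast = s :: (a :: b :: v).dropLast := by
        simp [List.dropLast]
      have hg : (s :: a :: b :: v).getLast! = (a :: b :: v).getLast! := by
        simp [List.getLast!, List.getLast]
      rw [hd, hg]
      have : (a :: b :: v).dropLast = a :: (b :: v).dropLast := by simp [List.dropLast]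
      rw [this, pvStrJoin_cons_cons, ← this]
      simp [String.append_assoc]

-- ===== VERDICT (by name: the statement is the Claim_ definition above) =====
theorem slotMissingPrompt_spec : Claim_equal_slotMissingPrompt := by
  intro l _
  show slotMissingPrompt l = slotMissingPrompt_alt l
  unfold slotMissingPrompt slotMissingPrompt_alt
  match l with
  | [] => simp
  | [s] =>
      simp only [pvFoldA, pvBodyA, pvSepA, List.length_cons, List.length_nil]
      norm_num
  | s :: a :: u =>
      simp only [pvFoldA]
      rw [pvBody_eq (s :: a :: u) 0 _ (by simp; omega) (by simp)]
      rw [pvBodyB_join]
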